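-- pv_equiv track=rewrite | github.com/indigo-the-agent/aamas2024_submission709 | 4-acxon/acxon_module.py | prune_tuples
-- ===== SOURCE A (Python) =====
-- def prune_tuples(tuples_instance_a, tuples_instance_b):
--
--     tuples_instance_a_cp = tuples_instance_a.copy() # list()
--     tuples_instance_b_cp = tuples_instance_b.copy() # list()
--
--     tp_to_delete = list()
--     while tuples_instance_a_cp:
--         tp_ = tuples_instance_a_cp.pop(0)
--         for tuple in tuples_instance_b:
--             if tp_[0] != tuple[0] and tp_[1] == tuple[1] and tp_[2] == tuple[2]:
--                 if tp_ not in tp_to_delete: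
--                     tp_to_delete.append(tp_)
--                 else:
--                     pass
--             else:
--                 pass
--
--     pruned_tuples_instance_a = list()
--     pruned_tuples_instance_a = [i for i in tuples_instance_a if i not in tp_to_delete]
--
--     tp_to_delete = list()
--     while tuples_instance_b_cp:
--         tp_ = tuples_instance_b_cp.pop(0)
--         for tuple in tuples_instance_a:
--             if tp_[1] == tuple[1] and tp_[2] == tuple[2]: # tp_[0] != tuple[0] or tp_[0] == tuple[0]
--                 if tp_ not in tp_to_delete:
--                     tp_to_delete.append(tp_)
--                 else:
--                     pass
--             else:
--                 pass
--
--     pruned_tuples_instance_b = list()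
--     pruned_tuples_instance_b = [i for i in tuples_instance_b if i not in tp_to_delete]
--
--     return pruned_tuples_instance_a, pruned_tuples_instance_b
-- ===== SOURCE B (Python) =====
-- def prune_tuples(tuples_instance_a, tuples_instance_b):
--     # index b by (y, z) -> set of first components
--     idx = {}
--     for t in tuples_instance_b:
--         idx.setdefault((t[1], t[2]), set()).add(t[0])
--     pruned_tuples_instance_a = [t for t in tuples_instance_a
--                                 if all(v == t[0] for v in idx.get((t[1], t[2]), ()))]
--     a_keys = {(t[1], t[2]) for t in tuples_instance_a}
--     pruned_tuples_instance_b = [t for t in tuples_instance_b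
--                                 if (t[1], t[2]) not in a_keys]
--     return pruned_tuples_instance_a, pruned_tuples_instance_b
-- ===== Notes on version B (the rewrite author's own statement) =====
-- stated objective: faster
-- what changed: Replaces A's per-tuple scans of the other list (plus linear membership tests in the deletion list) with a dict indexing b by (t[1],t[2]) to the set of first components and a set of a's (t[1],t[2]) keys, so each tuple is decided by one hash lookup.
import Mathlib
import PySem

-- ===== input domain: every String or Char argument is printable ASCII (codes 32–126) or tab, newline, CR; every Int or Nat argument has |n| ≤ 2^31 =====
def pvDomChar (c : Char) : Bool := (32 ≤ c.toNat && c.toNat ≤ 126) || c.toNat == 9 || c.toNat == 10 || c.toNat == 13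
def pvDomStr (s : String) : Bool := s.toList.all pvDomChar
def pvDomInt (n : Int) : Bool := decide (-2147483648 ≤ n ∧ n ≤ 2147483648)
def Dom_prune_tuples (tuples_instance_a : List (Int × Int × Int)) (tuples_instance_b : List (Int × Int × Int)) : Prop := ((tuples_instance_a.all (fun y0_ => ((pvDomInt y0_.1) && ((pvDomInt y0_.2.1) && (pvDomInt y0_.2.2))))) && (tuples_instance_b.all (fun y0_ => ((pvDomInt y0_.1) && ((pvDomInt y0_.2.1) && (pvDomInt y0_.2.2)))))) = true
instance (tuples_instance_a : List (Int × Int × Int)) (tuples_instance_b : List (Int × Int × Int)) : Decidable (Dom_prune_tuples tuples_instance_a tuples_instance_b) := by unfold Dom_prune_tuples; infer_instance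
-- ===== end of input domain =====

-- B replaces A's quadratic scan-per-tuple with one hash index of b by (t[1],t[2]) and a key set of a (O(n+m) vs O(n*m)); return value only.

-- ===== PORT A =====
-- the 'while …: tp_ = pending.pop(0); for u in other: …' deletion loops of A
-- (parameterised by the branch condition, which differs between A's two loops)
def pvDelLoop (cond : (Int × Int × Int) → (Int × Int × Int) → Bool)
    (pending other acc : List (Int × Int × Int)) : List (Int × Int × Int) :=
  match pending with
  | [] => acc
  | tp :: rest =>
      pvDelLoop cond rest other
        (other.foldl (fun acc u =>
          if cond tp u then (if tp ∈ acc then acc else acc ++ [tp]) else acc) acc)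

def prune_tuples (tuples_instance_a : List (Int × Int × Int)) (tuples_instance_b : List (Int × Int × Int)) : (List (Int × Int × Int)) × (List (Int × Int × Int)) :=
  let del1 := pvDelLoop
    (fun tp u => decide (tp.1 ≠ u.1 ∧ tp.2.1 = u.2.1 ∧ tp.2.2 = u.2.2))
    tuples_instance_a tuples_instance_b []
  let pruned_a := tuples_instance_a.filter (fun t => !(decide (t ∈ del1)))
  let del2 := pvDelLoop
    (fun tp u => decide (tp.2.1 = u.2.1 ∧ tp.2.2 = u.2.2))
    tuples_instance_b tuples_instance_a []
  let pruned_b := tuples_instance_b.filter (fun t => !(decide (t ∈ del2)))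
  (pruned_a, pruned_b)

-- ===== PORT B =====
-- idx.setdefault((t[1],t[2]), set()).add(t[0]) over b
def pvIdxB (l : List (Int × Int × Int)) : PySem.Dict (Int × Int) (PySem.Set Int) :=
  l.foldl (fun d t => d.modify (t.2.1, t.2.2) [] (fun s => PySem.Set.add s t.1)) PySem.Dict.empty

def prune_tuples_alt (tuples_instance_a : List (Int × Int × Int)) (tuples_instance_b : List (Int × Int × Int)) : (List (Int × Int × Int)) × (List (Int × Int × Int)) :=
  let idx := pvIdxB tuples_instance_b
  let pruned_a := tuples_instance_a.filter
    (fun t => (idx.getD (t.2.1, t.2.2) []).all (fun v => v == t.1))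
  let a_keys := PySem.Set.ofList (tuples_instance_a.map (fun t => (t.2.1, t.2.2)))
  let pruned_b := tuples_instance_b.filter
    (fun t => !(PySem.Set.contains a_keys (t.2.1, t.2.2)))
  (pruned_a, pruned_b)

-- ===== PRECONDITION & SPEC =====
def Spec_prune_tuples (tuples_instance_a : List (Int × Int × Int)) (tuples_instance_b : List (Int × Int × Int)) (out : (List (Int × Int × Int)) × (List (Int × Int × Int))) : Prop := out = prune_tuples_alt tuples_instance_a tuples_instance_b
instance (tuples_instance_a : List (Int × Int × Int)) (tuples_instance_b : List (Int × Int × Int)) (out : (List (Int × Int × Int)) × (List (Int × Int × Int))) : Decidable (Spec_prune_tuples tuples_instance_a tuples_instance_b out) := by unfold Spec_prune_tuples; infer_instance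

-- ===== CLAIM (what is proved, stated in full; the proofs are below) =====
def Claim_equal_prune_tuples : Prop := ∀ (tuples_instance_a : List (Int × Int × Int)) (tuples_instance_b : List (Int × Int × Int)), Dom_prune_tuples tuples_instance_a tuples_instance_b → Spec_prune_tuples tuples_instance_a tuples_instance_b (prune_tuples tuples_instance_a tuples_instance_b)

-- ===== LEMMAS AND PROOFS =====

-- membership in the inner 'for u in other' pass
lemma mem_innerA (cond : (Int × Int × Int) → (Int × Int × Int) → Bool)
    (tp : Int × Int × Int) (other : List (Int × Int × Int)) :
    ∀ (acc : List (Int × Int × Int)) (x : Int × Int × Int),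
    (x ∈ other.foldl (fun acc u =>
        if cond tp u then (if tp ∈ acc then acc else acc ++ [tp]) else acc) acc)
    ↔ x ∈ acc ∨ (x = tp ∧ ∃ u ∈ other, cond tp u = true) := by
  induction other with
  | nil => simp
  | cons u rest ih =>
      intro acc x
      simp only [List.foldl_cons]
      rw [ih]
      by_cases hc : cond tp u = true
      · simp only [hc, if_true]
        by_cases hm : tp ∈ acc
        · simp only [hm]
          constructor
          · rintro (h | h)
            · exact Or.inl h
            · exact Or.inr ⟨h.1, u, List.mem_cons_self .., hc⟩
          · rintro (h | ⟨rfl, u', hu', hcu'⟩)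
            · exact Or.inl h
            · exact Or.inl hm
        · simp only [if_neg hm, List.mem_append, List.mem_singleton]
          constructor
          · rintro ((h | h) | h)
            · exact Or.inl h
            · exact Or.inr ⟨h, u, List.mem_cons_self .., hc⟩
            · exact Or.inr ⟨h.1, h.2.imp fun u' ⟨hu', hcu'⟩ => ⟨List.mem_cons_of_mem _ hu', hcu'⟩⟩
          · rintro (h | ⟨rfl, u', hu', hcu'⟩)
            · exact Or.inl (Or.inl h)
            · exact Or.inl (Or.inr rfl)
      · simp only [hc]
        constructor
        · rintro (h | ⟨rfl, u', hu', hcu'⟩)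
          · exact Or.inl h
          · exact Or.inr ⟨rfl, u', List.mem_cons_of_mem _ hu', hcu'⟩
        · rintro (h | ⟨rfl, u', hu', hcu'⟩)
          · exact Or.inl h
          · rcases List.mem_cons.mp hu' with rfl | hu'
            · exact absurd hcu' hc
            · exact Or.inr ⟨rfl, u', hu', hcu'⟩

-- membership in a whole deletion loop of A
lemma mem_pvDelLoop (cond : (Int × Int × Int) → (Int × Int × Int) → Bool)
    (pending other : List (Int × Int × Int)) :
    ∀ (acc : List (Int × Int × Int)) (x : Int × Int × Int),
    x ∈ pvDelLoop cond pending other acc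
    ↔ x ∈ acc ∨ (x ∈ pending ∧ ∃ u ∈ other, cond x u = true) := by
  induction pending with
  | nil => simp [pvDelLoop]
  | cons tp rest ih =>
      intro acc x
      rw [pvDelLoop, ih, mem_innerA]
      constructor
      · rintro ((h | ⟨rfl, hu⟩) | ⟨hr, hu⟩)
        · exact Or.inl h
        · exact Or.inr ⟨List.mem_cons_self .., hu⟩
        · exact Or.inr ⟨List.mem_cons_of_mem _ hr, hu⟩
      · rintro (h | ⟨hx, hu⟩)
        · exact Or.inl (Or.inl h)
        · rcases List.mem_cons.mp hx with rfl | hx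
          · exact Or.inl (Or.inr ⟨rfl, hu⟩)
          · exact Or.inr ⟨hx, hu⟩

-- membership in the b-index of B
lemma mem_pvIdxB_aux (l : List (Int × Int × Int)) :
    ∀ (d : PySem.Dict (Int × Int) (PySem.Set Int)) (k : Int × Int) (x : Int),
    (x ∈ (l.foldl (fun d t => d.modify (t.2.1, t.2.2) [] (fun s => PySem.Set.add s t.1)) d).getD k [])
    ↔ x ∈ d.getD k [] ∨ ∃ t ∈ l, (t.2.1, t.2.2) = k ∧ t.1 = x := by
  induction l with
  | nil => simp
  | cons t rest ih =>
      intro d k x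
      simp only [List.foldl_cons]
      rw [ih]
      rw [PySem.Dict.getD_modify]
      by_cases hk : k = (t.2.1, t.2.2)
      · simp only [if_pos hk, PySem.Set.mem_add]
        constructor
        · rintro ((h | rfl) | ⟨t', ht', hkt', rfl⟩)
          · exact Or.inl (hk ▸ h)
          · exact Or.inr ⟨t, List.mem_cons_self .., hk.symm, rfl⟩
          · exact Or.inr ⟨t', List.mem_cons_of_mem _ ht', hkt', rfl⟩
        · rintro (h | ⟨t', ht', hkt', rfl⟩)
          · exact Or.inl (Or.inl (hk ▸ h))
          · rcases List.mem_cons.mp ht' with rfl | ht'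
            · exact Or.inl (Or.inr rfl)
            · exact Or.inr ⟨t', ht', hkt', rfl⟩
      · simp only [if_neg hk]
        constructor
        · rintro (h | ⟨t', ht', hkt', rfl⟩)
          · exact Or.inl h
          · exact Or.inr ⟨t', List.mem_cons_of_mem _ ht', hkt', rfl⟩
        · rintro (h | ⟨t', ht', hkt', rfl⟩)
          · exact Or.inl h
          · rcases List.mem_cons.mp ht' with rfl | ht'
            · exact absurd hkt'.symm hk
            · exact Or.inr ⟨t', ht', hkt', rfl⟩

lemma mem_pvIdxB (l : List (Int × Int × Int)) (k : Int × Int) (x : Int) :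
    x ∈ (pvIdxB l).getD k [] ↔ ∃ t ∈ l, (t.2.1, t.2.2) = k ∧ t.1 = x := by
  rw [pvIdxB, mem_pvIdxB_aux]
  simp [PySem.Dict.getD_empty]

-- ===== VERDICT (by name: the statement is the Claim_ definition above) =====
theorem prune_tuples_spec : Claim_equal_prune_tuples := by
  intro a b _
  unfold Spec_prune_tuples prune_tuples prune_tuples_alt
  refine Prod.ext ?_ ?_
  · -- pruned a
    simp only
    apply List.filter_congr
    intro t ht
    rw [Bool.eq_iff_iff]
    simp only [Bool.not_eq_eq_eq_not, Bool.not_true, decide_eq_false_iff_not,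
      List.all_eq_true, mem_pvDelLoop, beq_iff_eq, decide_eq_true_eq]
    constructor
    · intro hnot v hv
      rcases (mem_pvIdxB b (t.2.1, t.2.2) v).mp hv with ⟨u, hu, hku, rfl⟩
      by_contra hne
      exact hnot (Or.inr ⟨ht, u, hu, by
        refine ⟨fun h => hne h.symm, ?_, ?_⟩
        · exact congrArg Prod.fst hku |>.symm
        · exact congrArg Prod.snd hku |>.symm⟩)
    · rintro hall (h | ⟨-, u, hu, hne, h1, h2⟩)
      · simp at h
      · exact hne (hall u.1 ((mem_pvIdxB b (t.2.1, t.2.2) u.1).mpr ⟨u, hu, by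
          exact Prod.ext h1.symm h2.symm, rfl⟩)).symm
  · -- pruned b
    simp only
    apply List.filter_congr
    intro t ht
    rw [Bool.eq_iff_iff]
    simp only [Bool.not_eq_eq_eq_not, Bool.not_true, decide_eq_false_iff_not,
      mem_pvDelLoop, PySem.Set.contains_eq_listContains,
      List.contains_eq_mem, decide_eq_false_iff_not, PySem.Set.mem_ofList, List.mem_map,
      decide_eq_true_eq]
    constructor
    · intro hnot ⟨u, hu, hku⟩
      exact hnot (Or.inr ⟨ht, u, hu, (congrArg Prod.fst hku).symm, (congrArg Prod.snd hku).symm⟩)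
    · rintro hnot (h | ⟨-, u, hu, h1, h2⟩)
      · simp at h
      · exact hnot ⟨u, hu, Prod.ext h1.symm h2.symm⟩
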